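-- pv_equiv track=rewrite | github.com/Tumash-Ilia/Python_cv | cv09/hledac.py | search_in_lines
-- ===== SOURCE A (Python) =====
-- def search_in_lines(content, words):
--     '''
--     Metoda najde radky ve kterych vyskytuji zadana slova
--     :param content: list radku
--     :param words: vzor pro vyhledani
--     :return: ocislovane radky
--     '''
--     text = []
--     for line_num, line in enumerate(content, start=1):
--         cnt = 0
--         for word in words:
--             if word in line:
--                 cnt += 1
--             if cnt == len(words):
--                 text.append("".join([str(line_num), ":", line]))
--     return text
-- ===== SOURCE B (Python) =====
-- def search_in_lines(content, words):
--     '''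
--     Metoda najde radky ve kterych vyskytuji zadana slova
--     :param content: list radku
--     :param words: vzor pro vyhledani
--     :return: ocislovane radky
--     '''
--     candidates = list(enumerate(content, start=1))
--     for word in words:
--         candidates = [(n, line) for (n, line) in candidates if word in line]
--     return [f"{n}:{line}" for (n, line) in candidates]
-- ===== Notes on version B (the rewrite author's own statement) =====
-- stated objective: alternative
-- what changed: Word-major filtering of a shrinking numbered candidate list (one filter pass per word) replaces A's line-major inner loop that counts matches per line and appends inside the word loop.
-- intended difference: When words is empty and content is not, A returns [] because its append check sits inside the never-executed inner word loop, while B returns every numbered line, the intended value since every line trivially contains all of zero words. — e.g. on search_in_lines(["a"], []): A returns [], B returns ["1:a"]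
import Mathlib
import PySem

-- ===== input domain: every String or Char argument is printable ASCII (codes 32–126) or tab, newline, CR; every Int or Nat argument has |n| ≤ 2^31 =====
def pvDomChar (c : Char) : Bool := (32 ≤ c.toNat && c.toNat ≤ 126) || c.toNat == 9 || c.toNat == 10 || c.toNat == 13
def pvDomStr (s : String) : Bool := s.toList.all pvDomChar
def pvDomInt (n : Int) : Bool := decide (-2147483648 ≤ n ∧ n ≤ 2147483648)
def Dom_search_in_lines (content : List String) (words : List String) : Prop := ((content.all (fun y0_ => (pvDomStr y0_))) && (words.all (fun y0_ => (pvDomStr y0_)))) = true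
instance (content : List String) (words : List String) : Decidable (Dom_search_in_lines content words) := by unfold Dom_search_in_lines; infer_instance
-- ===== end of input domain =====

-- B replaces A's line-major count-and-append loop by word-major filtering of a numbered
-- candidate list (alternative decomposition, same cost); on empty `words` B returns all
-- numbered lines where A returns [] (see D_ below).

-- ===== PORT A =====
-- literal port: outer loop over enumerate(content, 1); inner loop over words keeps
-- state (cnt, text); 'cnt == len(words)' is checked after each word, as in the source
def search_in_lines (content : List String) (words : List String) : List String :=
  ((PySem.List.enumerate content 1).foldl
    (fun text p =>
      (words.foldl
        (fun (st : Int × List String) word =>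
          let cnt := if PySem.Str.isIn word p.2 then st.1 + 1 else st.1
          (cnt,
           if cnt = (words.length : Int) then
             st.2 ++ [PySem.Str.join "" [PySem.Int.toStr p.1, ":", p.2]]
           else st.2))
        (0, text)).2)
    [])

-- ===== PORT B =====
-- f"{n}:{line}" is ported as PySem.Str.join "" [str n, ":", line] (exact concatenation)
def search_in_lines_alt (content : List String) (words : List String) : List String :=
  (words.foldl
      (fun cand word => cand.filter (fun p => PySem.Str.isIn word p.2))
      (PySem.List.enumerate content 1)).map
    (fun p => PySem.Str.join "" [PySem.Int.toStr p.1, ":", p.2])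

-- ===== PRECONDITION & SPEC =====
-- When words is empty and content is not, A returns [] because its append check sits inside
-- the never-executed inner word loop, while B returns every numbered line, the intended value
-- since every line trivially contains all of zero words.
def D_search_in_lines (content : List String) (words : List String) : Prop :=
  words = [] ∧ content ≠ []
instance (content : List String) (words : List String) : Decidable (D_search_in_lines content words) := by unfold D_search_in_lines; infer_instance

def Spec_search_in_lines (content : List String) (words : List String) (out : List String) : Prop := ¬ D_search_in_lines content words → out = search_in_lines_alt content words
instance (content : List String) (words : List String) (out : List String) : Decidable (Spec_search_in_lines content words out) := by unfold Spec_search_in_lines; infer_instance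

def pvDiffWitness_search_in_lines : List String × List String := (["a"], [])
def pvDiffWitnessOut_search_in_lines : (List String) × (List String) := ([], ["1:a"])

-- ===== CLAIM (what is proved, stated in full; the proofs are below) =====
def Claim_unchanged_search_in_lines : Prop := ∀ (content : List String) (words : List String), Dom_search_in_lines content words → Spec_search_in_lines content words (search_in_lines content words)
def Claim_changed_search_in_lines : Prop := Dom_search_in_lines (pvDiffWitness_search_in_lines.1) (pvDiffWitness_search_in_lines.2) ∧ D_search_in_lines (pvDiffWitness_search_in_lines.1) (pvDiffWitness_search_in_lines.2) ∧ search_in_lines (pvDiffWitness_search_in_lines.1) (pvDiffWitness_search_in_lines.2) = pvDiffWitnessOut_search_in_lines.1 ∧ search_in_lines_alt (pvDiffWitness_search_in_lines.1) (pvDiffWitness_search_in_lines.2) = pvDiffWitnessOut_search_in_lines.2 ∧ pvDiffWitnessOut_search_in_lines.1 ≠ pvDiffWitnessOut_search_in_lines.2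
def Claim_exact_search_in_lines : Prop := ∀ (content : List String) (words : List String), Dom_search_in_lines content words → D_search_in_lines content words → search_in_lines content words ≠ search_in_lines_alt content words

-- ===== LEMMAS AND PROOFS =====

-- B's repeated filtering collapses to one filter by the conjunction of all tests
theorem foldl_filter_eq_filter_all {α : Type} (ws : List String) (q : String → α → Bool) :
    ∀ cand : List α,
      ws.foldl (fun c w => c.filter (q w)) cand
        = cand.filter (fun p => ws.all (fun w => q w p)) := by
  induction ws with
  | nil => intro cand; simp
  | cons w ws ih =>
    intro cand
    simp only [List.foldl_cons, ih, List.filter_filter, List.all_cons]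
    exact List.filter_congr (fun p _ => by rw [Bool.and_comm])

-- A's inner word loop, characterised: with state (c, t) and c + |ws| ≤ len(words),
-- the text is appended to exactly once, at the last word, iff all words matched.
theorem innerA_spec (words : List String) (line : String) (fmt : String) :
    ∀ (ws : List String) (c : Int) (t : List String),
      c + (ws.length : Int) ≤ (words.length : Int) →
      ws.foldl
        (fun (st : Int × List String) word =>
          let cnt := if PySem.Str.isIn word line then st.1 + 1 else st.1
          (cnt, if cnt = (words.length : Int) then st.2 ++ [fmt] else st.2))
        (c, t)
      = (c + ((ws.filter (fun w => PySem.Str.isIn w line)).length : Int),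
         if ws ≠ [] ∧ c + ((ws.filter (fun w => PySem.Str.isIn w line)).length : Int) = (words.length : Int)
         then t ++ [fmt] else t) := by
  intro ws
  induction ws with
  | nil => intro c t _; simp
  | cons w ws ih =>
    intro c t hle
    simp only [List.foldl_cons]
    by_cases hw : PySem.Str.isIn w line = true
    · have hwc : PySem.Chars.isIn w.toList line.toList = true := by simpa using hw
      have e1 : (if PySem.Str.isIn w line = true then c + 1 else c) = c + 1 := if_pos hw
      rw [e1]
      have h1 : c + 1 + (ws.length : Int) ≤ (words.length : Int) := by
        simp only [List.length_cons] at hle; push_cast at hle ⊢; omega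
      cases ws with
      | nil => simp [hwc]
      | cons w' ws' =>
        have hne : c + 1 ≠ (words.length : Int) := by
          simp only [List.length_cons] at h1; push_cast at h1; omega
        rw [if_neg hne, ih (c + 1) t h1]
        simp only [List.filter_cons, ne_eq, reduceCtorEq, not_false_eq_true, true_and]
        rw [if_pos hw]
        generalize (if PySem.Str.isIn w' line = true then
            w' :: List.filter (fun w => PySem.Str.isIn w line) ws'
          else List.filter (fun w => PySem.Str.isIn w line) ws') = X
        have hlen : ((w :: X).length : Int) = (X.length : Int) + 1 := by
          push_cast [List.length_cons]; ring
        rw [hlen]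
        have hc : c + 1 + (X.length : Int) = c + ((X.length : Int) + 1) := by ring
        rw [hc]
    · have hwc : PySem.Chars.isIn w.toList line.toList = false := by
        simpa using hw
      have e1 : (if PySem.Str.isIn w line = true then c + 1 else c) = c := if_neg hw
      rw [e1]
      have h1 : c + (ws.length : Int) ≤ (words.length : Int) := by
        simp only [List.length_cons] at hle; push_cast at hle ⊢; omega
      cases ws with
      | nil =>
        simp only [List.foldl_nil, List.filter_cons]
        by_cases hc : c = (words.length : Int) <;> simp [hc, hwc]
      | cons w' ws' =>
        have hne : c ≠ (words.length : Int) := by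
          simp only [List.length_cons] at h1; push_cast at h1; omega
        rw [if_neg hne, ih c t h1]
        simp [List.filter_cons, hwc]

-- all words matched ⟺ the match count reaches len(words)
theorem count_eq_iff_all (ws : List String) (line : String) :
    (((ws.filter (fun w => PySem.Str.isIn w line)).length : Int) = (ws.length : Int))
      ↔ ws.all (fun w => PySem.Str.isIn w line) = true := by
  rw [Int.natCast_inj, List.length_filter_eq_length_iff, List.all_eq_true]

theorem A_eq_B_of_words_ne_nil (content words : List String) (h : words ≠ []) :
    search_in_lines content words = search_in_lines_alt content words := by
  unfold search_in_lines search_in_lines_alt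
  rw [foldl_filter_eq_filter_all]
  have hbody : ∀ (text : List (String)) (p : Int × String),
      (words.foldl
        (fun (st : Int × List String) word =>
          let cnt := if PySem.Str.isIn word p.2 then st.1 + 1 else st.1
          (cnt,
           if cnt = (words.length : Int) then
             st.2 ++ [PySem.Str.join "" [PySem.Int.toStr p.1, ":", p.2]]
           else st.2))
        (0, text)).2
      = if words.all (fun w => PySem.Str.isIn w p.2) = true then
          text ++ [PySem.Str.join "" [PySem.Int.toStr p.1, ":", p.2]] else text := by
    intro text p
    rw [innerA_spec words p.2 _ words (0 : Int) text (by omega)]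
    simp only [zero_add]
    by_cases hall : words.all (fun w => PySem.Str.isIn w p.2) = true
    · rw [if_pos ⟨h, (count_eq_iff_all words p.2).mpr hall⟩, if_pos hall]
    · rw [if_neg (fun hc => hall ((count_eq_iff_all words p.2).mp hc.2)), if_neg hall]
  have hfun : (fun (text : List String) (p : Int × String) =>
      (words.foldl
        (fun (st : Int × List String) word =>
          let cnt := if PySem.Str.isIn word p.2 then st.1 + 1 else st.1
          (cnt,
           if cnt = (words.length : Int) then
             st.2 ++ [PySem.Str.join "" [PySem.Int.toStr p.1, ":", p.2]]
           else st.2))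
        (0, text)).2)
      = (fun text p =>
          if words.all (fun w => PySem.Str.isIn w p.2) = true then
            text ++ [PySem.Str.join "" [PySem.Int.toStr p.1, ":", p.2]] else text) := by
    funext text p; exact hbody text p
  rw [hfun, PySem.List.foldl_append_ite
        (fun p : Int × String => words.all (fun w => PySem.Str.isIn w p.2) = true)
        (fun p : Int × String => PySem.Str.join "" [PySem.Int.toStr p.1, ":", p.2])]
  rw [List.nil_append]
  congr 1
  exact List.filter_congr (fun p _ => by cases words.all fun w => PySem.Str.isIn w p.2 <;> simp)

theorem A_of_words_nil (content : List String) :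
    search_in_lines content [] = [] := by
  unfold search_in_lines
  induction (PySem.List.enumerate content 1) with
  | nil => rfl
  | cons p ps ih => simp only [List.foldl_cons, List.foldl_nil] at ih ⊢; exact ih

-- ===== VERDICT (by name: the statement is the Claim_ definition above) =====
theorem search_in_lines_spec : Claim_unchanged_search_in_lines := by
  intro content words _ hD
  by_cases hw : words = []
  · subst hw
    have hc : content = [] := by
      by_contra hc
      exact hD ⟨rfl, hc⟩
    subst hc
    rfl
  · exact A_eq_B_of_words_ne_nil content words hw

theorem search_in_lines_changed : Claim_changed_search_in_lines := by
  unfold Claim_changed_search_in_lines; decide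

theorem search_in_lines_tight : Claim_exact_search_in_lines := by
  intro content words _ hD
  obtain ⟨hw, hc⟩ := hD
  subst hw
  rw [A_of_words_nil]
  unfold search_in_lines_alt
  cases content with
  | nil => exact absurd rfl hc
  | cons l ls =>
    simp [PySem.List.enumerate_cons]
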